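-- pv_equiv track=rewrite | github.com/Akicou/nayhein-project | inference.py | _extract_lora_target
-- ===== SOURCE A (Python) =====
-- from typing import Any, Dict, List, Optional
--
-- def _extract_lora_target(key: str) -> tuple[Optional[str], Optional[str]]:
--     suffix_map = {
--         ".lora_A.weight": "A",
--         ".lora_B.weight": "B",
--         ".lora_A.default.weight": "A",
--         ".lora_B.default.weight": "B",
--     }
--     for suffix, part in suffix_map.items():
--         if key.endswith(suffix):
--             return key[: -len(suffix)], part
--     return None, None
-- ===== SOURCE B (Python) =====
-- from typing import Optional
--
-- def _extract_lora_target(key: str) -> tuple[Optional[str], Optional[str]]: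
--     # Peel the key from the end instead of scanning a suffix map.
--     if not key.endswith(".weight"):
--         return None, None
--     stem = key[:-7]
--     if stem.endswith(".default"):
--         stem = stem[:-8]
--     if stem.endswith(".lora_A"):
--         return stem[:-7], "A"
--     if stem.endswith(".lora_B"):
--         return stem[:-7], "B"
--     return None, None
-- ===== Notes on version B (the rewrite author's own statement) =====
-- stated objective: simpler
-- what changed: Replaces the four-entry suffix-map scan by peeling the key from the end: strip '.weight', optionally strip '.default', then test for '.lora_A'/'.lora_B'.
import Mathlib
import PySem

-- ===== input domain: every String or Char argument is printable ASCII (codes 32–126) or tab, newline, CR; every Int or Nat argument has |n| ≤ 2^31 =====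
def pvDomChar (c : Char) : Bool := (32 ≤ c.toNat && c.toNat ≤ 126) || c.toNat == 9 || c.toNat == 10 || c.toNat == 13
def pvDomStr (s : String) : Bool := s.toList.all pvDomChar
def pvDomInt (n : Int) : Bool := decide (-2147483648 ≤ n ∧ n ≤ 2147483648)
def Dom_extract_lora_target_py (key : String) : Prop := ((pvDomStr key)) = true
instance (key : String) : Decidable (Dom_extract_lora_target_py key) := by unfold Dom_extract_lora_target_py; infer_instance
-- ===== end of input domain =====

-- B replaces A's four-entry suffix-map scan by peeling the key from the end
-- ('.weight', optional '.default', then '.lora_A'/'.lora_B'); objective: simpler.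

-- ===== PORT A =====
-- A iterates over a literal dict in insertion order; the loop is unrolled over its four entries.
def extract_lora_target_py (key : String) : Option String × Option String :=
  if PySem.Str.endswith key ".lora_A.weight" then
    (some (PySem.Str.slice key none (some (-14))), some "A")
  else if PySem.Str.endswith key ".lora_B.weight" then
    (some (PySem.Str.slice key none (some (-14))), some "B")
  else if PySem.Str.endswith key ".lora_A.default.weight" then
    (some (PySem.Str.slice key none (some (-22))), some "A")
  else if PySem.Str.endswith key ".lora_B.default.weight" then
    (some (PySem.Str.slice key none (some (-22))), some "B")
  else (none, none)

-- ===== PORT B =====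
def extract_lora_target_py_alt (key : String) : Option String × Option String :=
  if !(PySem.Str.endswith key ".weight") then (none, none)
  else
    let stem0 := PySem.Str.slice key none (some (-7))
    let stem := if PySem.Str.endswith stem0 ".default" then
                  PySem.Str.slice stem0 none (some (-8))
                else stem0
    if PySem.Str.endswith stem ".lora_A" then
      (some (PySem.Str.slice stem none (some (-7))), some "A")
    else if PySem.Str.endswith stem ".lora_B" then
      (some (PySem.Str.slice stem none (some (-7))), some "B")
    else (none, none)

-- ===== PRECONDITION & SPEC =====
def Spec_extract_lora_target_py (key : String) (out : Option String × Option String) : Prop := out = extract_lora_target_py_alt key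
instance (key : String) (out : Option String × Option String) : Decidable (Spec_extract_lora_target_py key out) := by unfold Spec_extract_lora_target_py; infer_instance

-- ===== CLAIM (what is proved, stated in full; the proofs are below) =====
def Claim_equal_extract_lora_target_py : Prop := ∀ (key : String), Dom_extract_lora_target_py key → Spec_extract_lora_target_py key (extract_lora_target_py key)

-- ===== LEMMAS AND PROOFS =====

-- toList of each string literal of the ports, evaluated once (rfl is slow on String literals).
theorem pvT_w : (".weight" : String).toList = ['.','w','e','i','g','h','t'] := by rfl
theorem pvT_d : (".default" : String).toList = ['.','d','e','f','a','u','l','t'] := by rfl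
theorem pvT_la : (".lora_A" : String).toList = ['.','l','o','r','a','_','A'] := by rfl
theorem pvT_lb : (".lora_B" : String).toList = ['.','l','o','r','a','_','B'] := by rfl
theorem pvT_law : (".lora_A.weight" : String).toList = ['.','l','o','r','a','_','A','.','w','e','i','g','h','t'] := by rfl
theorem pvT_lbw : (".lora_B.weight" : String).toList = ['.','l','o','r','a','_','B','.','w','e','i','g','h','t'] := by rfl
theorem pvT_lad : (".lora_A.default" : String).toList = ['.','l','o','r','a','_','A','.','d','e','f','a','u','l','t'] := by rfl
theorem pvT_lbd : (".lora_B.default" : String).toList = ['.','l','o','r','a','_','B','.','d','e','f','a','u','l','t'] := by rfl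
theorem pvT_ladw : (".lora_A.default.weight" : String).toList = ['.','l','o','r','a','_','A','.','d','e','f','a','u','l','t','.','w','e','i','g','h','t'] := by rfl
theorem pvT_lbdw : (".lora_B.default.weight" : String).toList = ['.','l','o','r','a','_','B','.','d','e','f','a','u','l','t','.','w','e','i','g','h','t'] := by rfl

-- b is a suffix of a ++ b, so if a ++ b is a suffix of l then so is b.
theorem pv_suffix_of_append_suffix {a b l : List Char} (h : (a ++ b) <:+ l) : b <:+ l :=
  (List.suffix_append a b).trans h

-- With b a suffix of l, peeling b: a ++ b <:+ l ↔ a <:+ the part before b.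
theorem pv_append_suffix_iff {a b l : List Char} (hb : b <:+ l) :
    ((a ++ b) <:+ l ↔ a <:+ l.take (l.length - b.length)) := by
  obtain ⟨t, ht⟩ := hb
  have hlen : l.length - b.length = t.length := by
    rw [← ht]; simp
  have htake : l.take t.length = t := by
    rw [← ht]; simp
  rw [hlen, htake]
  constructor
  · rintro ⟨u, hu⟩
    refine ⟨u, ?_⟩
    have : (u ++ a) ++ b = t ++ b := by simpa [List.append_assoc] using hu.trans ht.symm
    exact List.append_cancel_right this
  · rintro ⟨u, hu⟩
    exact ⟨u, by rw [← ht, ← hu]; simp [List.append_assoc]⟩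

-- Two suffixes of the same list are nested (shorter into longer).
theorem pv_suffix_of_suffix_length_le {p q l : List Char}
    (hp : p <:+ l) (hq : q <:+ l) (h : p.length ≤ q.length) : p <:+ q := by
  rw [← List.reverse_prefix] at hp hq ⊢
  exact List.prefix_of_prefix_length_le hp hq (by simpa using h)

-- Str.slice s [: -k] at list level, and its numeral instances.
theorem pv_slice_str (s : String) (k : Nat) (hk : 0 < k) :
    (PySem.Str.slice s none (some (-(k : Int)))).toList = s.toList.take (s.toList.length - k) := by
  rw [PySem.Str.toList_slice, PySem.Chars.slice_eq_listSlice,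
      PySem.List.slice_to_neg_natCast _ _ hk]

theorem pv_slice7 (s : String) :
    (PySem.Str.slice s none (some (-7))).toList = s.toList.take (s.toList.length - 7) := by
  rw [show ((-7 : Int)) = -((7 : Nat) : Int) from by norm_num, pv_slice_str s 7 (by norm_num)]

theorem pv_slice8 (s : String) :
    (PySem.Str.slice s none (some (-8))).toList = s.toList.take (s.toList.length - 8) := by
  rw [show ((-8 : Int)) = -((8 : Nat) : Int) from by norm_num, pv_slice_str s 8 (by norm_num)]

theorem pv_slice14 (s : String) :
    (PySem.Str.slice s none (some (-14))).toList = s.toList.take (s.toList.length - 14) := by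
  rw [show ((-14 : Int)) = -((14 : Nat) : Int) from by norm_num, pv_slice_str s 14 (by norm_num)]

theorem pv_slice22 (s : String) :
    (PySem.Str.slice s none (some (-22))).toList = s.toList.take (s.toList.length - 22) := by
  rw [show ((-22 : Int)) = -((22 : Nat) : Int) from by norm_num, pv_slice_str s 22 (by norm_num)]

set_option maxHeartbeats 1000000 in
theorem pv_main (key : String) :
    extract_lora_target_py key = extract_lora_target_py_alt key := by
  by_cases hW : PySem.Str.endswith key ".weight" = true
  · -- key ends with ".weight"
    have hWs : (".weight" : String).toList <:+ key.toList := by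
      rw [PySem.Str.endswith_eq, PySem.Chars.endswith_iff] at hW; exact hW
    have hstem0 : (PySem.Str.slice key none (some (-7))).toList
        = key.toList.take (key.toList.length - 7) := pv_slice7 key
    -- the four suffix tests of A, decomposed past ".weight"
    have hA14 : PySem.Str.endswith key ".lora_A.weight" = true
        ↔ (".lora_A" : String).toList <:+ key.toList.take (key.toList.length - 7) := by
      rw [PySem.Str.endswith_eq, PySem.Chars.endswith_iff,
          show (".lora_A.weight" : String).toList
            = (".lora_A" : String).toList ++ (".weight" : String).toList from by
              rw [pvT_law, pvT_la, pvT_w]; rfl,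
          pv_append_suffix_iff hWs, pvT_w,
          show List.length ['.','w','e','i','g','h','t'] = 7 from rfl]
    have hB14 : PySem.Str.endswith key ".lora_B.weight" = true
        ↔ (".lora_B" : String).toList <:+ key.toList.take (key.toList.length - 7) := by
      rw [PySem.Str.endswith_eq, PySem.Chars.endswith_iff,
          show (".lora_B.weight" : String).toList
            = (".lora_B" : String).toList ++ (".weight" : String).toList from by
              rw [pvT_lbw, pvT_lb, pvT_w]; rfl,
          pv_append_suffix_iff hWs, pvT_w,
          show List.length ['.','w','e','i','g','h','t'] = 7 from rfl]
    have hA22 : PySem.Str.endswith key ".lora_A.default.weight" = true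
        ↔ (".lora_A.default" : String).toList <:+ key.toList.take (key.toList.length - 7) := by
      rw [PySem.Str.endswith_eq, PySem.Chars.endswith_iff,
          show (".lora_A.default.weight" : String).toList
            = (".lora_A.default" : String).toList ++ (".weight" : String).toList from by
              rw [pvT_ladw, pvT_lad, pvT_w]; rfl,
          pv_append_suffix_iff hWs, pvT_w,
          show List.length ['.','w','e','i','g','h','t'] = 7 from rfl]
    have hB22 : PySem.Str.endswith key ".lora_B.default.weight" = true
        ↔ (".lora_B.default" : String).toList <:+ key.toList.take (key.toList.length - 7) := by
      rw [PySem.Str.endswith_eq, PySem.Chars.endswith_iff,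
          show (".lora_B.default.weight" : String).toList
            = (".lora_B.default" : String).toList ++ (".weight" : String).toList from by
              rw [pvT_lbdw, pvT_lbd, pvT_w]; rfl,
          pv_append_suffix_iff hWs, pvT_w,
          show List.length ['.','w','e','i','g','h','t'] = 7 from rfl]
    have htlen : (key.toList.take (key.toList.length - 7)).length = key.toList.length - 7 := by
      rw [List.length_take]; omega
    have hDiff : PySem.Str.endswith (PySem.Str.slice key none (some (-7))) ".default" = true
        ↔ (".default" : String).toList <:+ key.toList.take (key.toList.length - 7) := by
      rw [PySem.Str.endswith_eq, PySem.Chars.endswith_iff, hstem0]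
    by_cases hD : (".default" : String).toList <:+ key.toList.take (key.toList.length - 7)
    · -- stem ends with ".default": the 14-char suffixes cannot match
      have hnA14 : ¬ (".lora_A" : String).toList <:+ key.toList.take (key.toList.length - 7) := by
        intro h
        have := pv_suffix_of_suffix_length_le h hD (by rw [pvT_la, pvT_d]; decide)
        rw [pvT_la, pvT_d] at this
        revert this; decide
      have hnB14 : ¬ (".lora_B" : String).toList <:+ key.toList.take (key.toList.length - 7) := by
        intro h
        have := pv_suffix_of_suffix_length_le h hD (by rw [pvT_lb, pvT_d]; decide)
        rw [pvT_lb, pvT_d] at this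
        revert this; decide
      -- the doubly-peeled stem, as a list
      have hstem1 : (PySem.Str.slice (PySem.Str.slice key none (some (-7))) none (some (-8))).toList
          = key.toList.take (key.toList.length - 15) := by
        rw [pv_slice8, hstem0, htlen, List.take_take]
        exact congrArg (fun m => List.take m key.toList) (by omega)
      have hA15 : (".lora_A.default" : String).toList <:+ key.toList.take (key.toList.length - 7)
          ↔ (".lora_A" : String).toList <:+ key.toList.take (key.toList.length - 15) := by
        rw [show (".lora_A.default" : String).toList
              = (".lora_A" : String).toList ++ (".default" : String).toList from by
                rw [pvT_lad, pvT_la, pvT_d]; rfl,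
            pv_append_suffix_iff hD, pvT_d, htlen,
            show List.length ['.','d','e','f','a','u','l','t'] = 8 from rfl, List.take_take,
            show min (key.toList.length - 7 - 8) (key.toList.length - 7)
              = key.toList.length - 15 from by omega]
      have hB15 : (".lora_B.default" : String).toList <:+ key.toList.take (key.toList.length - 7)
          ↔ (".lora_B" : String).toList <:+ key.toList.take (key.toList.length - 15) := by
        rw [show (".lora_B.default" : String).toList
              = (".lora_B" : String).toList ++ (".default" : String).toList from by
                rw [pvT_lbd, pvT_lb, pvT_d]; rfl,
            pv_append_suffix_iff hD, pvT_d, htlen,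
            show List.length ['.','d','e','f','a','u','l','t'] = 8 from rfl, List.take_take,
            show min (key.toList.length - 7 - 8) (key.toList.length - 7)
              = key.toList.length - 15 from by omega]
      have hA2 : PySem.Str.endswith (PySem.Str.slice (PySem.Str.slice key none (some (-7))) none (some (-8))) ".lora_A" = true
          ↔ (".lora_A" : String).toList <:+ key.toList.take (key.toList.length - 15) := by
        rw [PySem.Str.endswith_eq, PySem.Chars.endswith_iff, hstem1]
      have hB2 : PySem.Str.endswith (PySem.Str.slice (PySem.Str.slice key none (some (-7))) none (some (-8))) ".lora_B" = true
          ↔ (".lora_B" : String).toList <:+ key.toList.take (key.toList.length - 15) := by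
        rw [PySem.Str.endswith_eq, PySem.Chars.endswith_iff, hstem1]
      have hout : (PySem.Str.slice (PySem.Str.slice (PySem.Str.slice key none (some (-7))) none (some (-8))) none (some (-7)))
          = PySem.Str.slice key none (some (-22)) := by
        rw [← String.toList_inj, pv_slice7, pv_slice22, hstem1, List.length_take, List.take_take]
        exact congrArg (fun m => List.take m key.toList) (by omega)
      have f1 : PySem.Str.endswith key ".lora_A.weight" = false :=
        Bool.eq_false_iff.mpr (fun h => hnA14 (hA14.mp h))
      have f2 : PySem.Str.endswith key ".lora_B.weight" = false :=
        Bool.eq_false_iff.mpr (fun h => hnB14 (hB14.mp h))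
      have fD : PySem.Str.endswith (PySem.Str.slice key none (some (-7))) ".default" = true :=
        hDiff.mpr hD
      by_cases hA : (".lora_A" : String).toList <:+ key.toList.take (key.toList.length - 15)
      · simp only [extract_lora_target_py, extract_lora_target_py_alt]
        rw [hW, f1, f2, fD]
        simp only [Bool.false_eq_true, Bool.not_true, Bool.not_false, eq_self_iff_true, if_true, if_false]
        rw [hA22.mpr (hA15.mpr hA), hA2.mpr hA, hout]
        simp only [Bool.false_eq_true, Bool.not_true, Bool.not_false, eq_self_iff_true, if_true, if_false]
      · have fA2 : PySem.Str.endswith (PySem.Str.slice (PySem.Str.slice key none (some (-7))) none (some (-8))) ".lora_A" = false :=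
          Bool.eq_false_iff.mpr (fun h => hA (hA2.mp h))
        have fA22 : PySem.Str.endswith key ".lora_A.default.weight" = false :=
          Bool.eq_false_iff.mpr (fun h => hA (hA15.mp (hA22.mp h)))
        by_cases hB : (".lora_B" : String).toList <:+ key.toList.take (key.toList.length - 15)
        · simp only [extract_lora_target_py, extract_lora_target_py_alt]
          rw [hW, f1, f2, fD]
          simp only [Bool.false_eq_true, Bool.not_true, Bool.not_false, eq_self_iff_true, if_true, if_false]
          rw [fA2, fA22, hB22.mpr (hB15.mpr hB), hB2.mpr hB, hout]
        · have fB2 : PySem.Str.endswith (PySem.Str.slice (PySem.Str.slice key none (some (-7))) none (some (-8))) ".lora_B" = false :=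
            Bool.eq_false_iff.mpr (fun h => hB (hB2.mp h))
          have fB22 : PySem.Str.endswith key ".lora_B.default.weight" = false :=
            Bool.eq_false_iff.mpr (fun h => hB (hB15.mp (hB22.mp h)))
          simp only [extract_lora_target_py, extract_lora_target_py_alt]
          rw [hW, f1, f2, fD]
          simp only [Bool.false_eq_true, Bool.not_true, Bool.not_false, eq_self_iff_true, if_true, if_false]
          rw [fA2, fA22, fB2, fB22]
          simp only [Bool.false_eq_true, Bool.not_true, Bool.not_false, eq_self_iff_true, if_true, if_false]
    · -- stem does not end with ".default": the 22-char suffixes cannot match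
      have hnA22 : ¬ (".lora_A.default" : String).toList <:+ key.toList.take (key.toList.length - 7) := by
        intro h
        exact hD (pv_suffix_of_append_suffix
          (by rwa [show (".lora_A.default" : String).toList
                = (".lora_A" : String).toList ++ (".default" : String).toList from by
                  rw [pvT_lad, pvT_la, pvT_d]; rfl] at h))
      have hnB22 : ¬ (".lora_B.default" : String).toList <:+ key.toList.take (key.toList.length - 7) := by
        intro h
        exact hD (pv_suffix_of_append_suffix
          (by rwa [show (".lora_B.default" : String).toList
                = (".lora_B" : String).toList ++ (".default" : String).toList from by
                  rw [pvT_lbd, pvT_lb, pvT_d]; rfl] at h))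
      have hA1 : PySem.Str.endswith (PySem.Str.slice key none (some (-7))) ".lora_A" = true
          ↔ (".lora_A" : String).toList <:+ key.toList.take (key.toList.length - 7) := by
        rw [PySem.Str.endswith_eq, PySem.Chars.endswith_iff, hstem0]
      have hB1 : PySem.Str.endswith (PySem.Str.slice key none (some (-7))) ".lora_B" = true
          ↔ (".lora_B" : String).toList <:+ key.toList.take (key.toList.length - 7) := by
        rw [PySem.Str.endswith_eq, PySem.Chars.endswith_iff, hstem0]
      have hout : (PySem.Str.slice (PySem.Str.slice key none (some (-7))) none (some (-7)))
          = PySem.Str.slice key none (some (-14)) := by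
        rw [← String.toList_inj, pv_slice7, pv_slice14, hstem0, List.length_take, List.take_take]
        exact congrArg (fun m => List.take m key.toList) (by omega)
      have fD : PySem.Str.endswith (PySem.Str.slice key none (some (-7))) ".default" = false :=
        Bool.eq_false_iff.mpr (fun h => hD (hDiff.mp h))
      have fA22 : PySem.Str.endswith key ".lora_A.default.weight" = false :=
        Bool.eq_false_iff.mpr (fun h => hnA22 (hA22.mp h))
      have fB22 : PySem.Str.endswith key ".lora_B.default.weight" = false :=
        Bool.eq_false_iff.mpr (fun h => hnB22 (hB22.mp h))
      by_cases hA : (".lora_A" : String).toList <:+ key.toList.take (key.toList.length - 7)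
      · simp only [extract_lora_target_py, extract_lora_target_py_alt]
        rw [hW, fD]
        simp only [Bool.false_eq_true, Bool.not_true, Bool.not_false, eq_self_iff_true, if_true, if_false]
        rw [hA14.mpr hA, hA1.mpr hA, hout]
        simp only [Bool.false_eq_true, Bool.not_true, Bool.not_false, eq_self_iff_true, if_true, if_false]
      · have f1 : PySem.Str.endswith key ".lora_A.weight" = false :=
          Bool.eq_false_iff.mpr (fun h => hA (hA14.mp h))
        have fA1 : PySem.Str.endswith (PySem.Str.slice key none (some (-7))) ".lora_A" = false :=
          Bool.eq_false_iff.mpr (fun h => hA (hA1.mp h))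
        by_cases hB : (".lora_B" : String).toList <:+ key.toList.take (key.toList.length - 7)
        · simp only [extract_lora_target_py, extract_lora_target_py_alt]
          rw [hW, fD]
          simp only [Bool.false_eq_true, Bool.not_true, Bool.not_false, eq_self_iff_true, if_true, if_false]
          rw [f1, fA1, hB14.mpr hB, hB1.mpr hB, hout]
          simp only [Bool.false_eq_true, Bool.not_true, Bool.not_false, eq_self_iff_true, if_true, if_false]
        · have f2 : PySem.Str.endswith key ".lora_B.weight" = false :=
            Bool.eq_false_iff.mpr (fun h => hB (hB14.mp h))
          have fB1 : PySem.Str.endswith (PySem.Str.slice key none (some (-7))) ".lora_B" = false :=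
            Bool.eq_false_iff.mpr (fun h => hB (hB1.mp h))
          simp only [extract_lora_target_py, extract_lora_target_py_alt]
          rw [hW, fD]
          simp only [Bool.false_eq_true, Bool.not_true, Bool.not_false, eq_self_iff_true, if_true, if_false]
          rw [f1, f2, fA1, fB1, fA22, fB22]
          simp only [Bool.false_eq_true, Bool.not_true, Bool.not_false, eq_self_iff_true, if_true, if_false]
  · -- key does not end with ".weight": every test of A fails too
    have hWs : ¬ (".weight" : String).toList <:+ key.toList := by
      rw [PySem.Str.endswith_eq, PySem.Chars.endswith_iff] at hW; exact hW
    have fW : PySem.Str.endswith key ".weight" = false := Bool.eq_false_iff.mpr hW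
    have f1 : PySem.Str.endswith key ".lora_A.weight" = false := by
      rw [Bool.eq_false_iff, Ne, PySem.Str.endswith_eq, PySem.Chars.endswith_iff]
      intro h
      exact hWs (pv_suffix_of_append_suffix
        (by rwa [show (".lora_A.weight" : String).toList
              = (".lora_A" : String).toList ++ (".weight" : String).toList from by
                rw [pvT_law, pvT_la, pvT_w]; rfl] at h))
    have f2 : PySem.Str.endswith key ".lora_B.weight" = false := by
      rw [Bool.eq_false_iff, Ne, PySem.Str.endswith_eq, PySem.Chars.endswith_iff]
      intro h
      exact hWs (pv_suffix_of_append_suffix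
        (by rwa [show (".lora_B.weight" : String).toList
              = (".lora_B" : String).toList ++ (".weight" : String).toList from by
                rw [pvT_lbw, pvT_lb, pvT_w]; rfl] at h))
    have f3 : PySem.Str.endswith key ".lora_A.default.weight" = false := by
      rw [Bool.eq_false_iff, Ne, PySem.Str.endswith_eq, PySem.Chars.endswith_iff]
      intro h
      exact hWs (pv_suffix_of_append_suffix
        (by rwa [show (".lora_A.default.weight" : String).toList
              = (".lora_A.default" : String).toList ++ (".weight" : String).toList from by
                rw [pvT_ladw, pvT_lad, pvT_w]; rfl] at h))
    have f4 : PySem.Str.endswith key ".lora_B.default.weight" = false := by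
      rw [Bool.eq_false_iff, Ne, PySem.Str.endswith_eq, PySem.Chars.endswith_iff]
      intro h
      exact hWs (pv_suffix_of_append_suffix
        (by rwa [show (".lora_B.default.weight" : String).toList
              = (".lora_B.default" : String).toList ++ (".weight" : String).toList from by
                rw [pvT_lbdw, pvT_lbd, pvT_w]; rfl] at h))
    simp only [extract_lora_target_py, extract_lora_target_py_alt]
    rw [fW, f1, f2, f3, f4]
    simp only [Bool.false_eq_true, Bool.not_true, Bool.not_false, eq_self_iff_true, if_true, if_false]

-- ===== VERDICT (by name: the statement is the Claim_ definition above) =====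
theorem extract_lora_target_py_spec : Claim_equal_extract_lora_target_py := by
  intro key _
  unfold Spec_extract_lora_target_py
  exact pv_main key
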